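-- pv_equiv track=rewrite | github.com/lunaticfoxy/TIL | Algorithm/leetcode/MakeArrayStrictlyIncreasing(NotSolved).py | makeArrayIncreasing
-- ===== SOURCE A (Python) =====
-- from typing import List
--
-- def makeArrayIncreasing(arr1: List[int], arr2: List[int]) -> int:
--     arr2 = sorted(arr2)
--     cnt = 0
--
--     j = 0
--     for i in range(len(arr1) - 1):
--         if arr1[i] >= arr1[i+1]:
--             while True:
--                 if j >= len(arr2):
--                     return -1
--                 elif (i==0 or arr2[j] > arr1[i-1]) and arr2[j] < arr1[i+1]:
--                     cnt += 1
--                     j += 1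
--                     break
--                 else:
--                     j += 1
--
--     return cnt
-- ===== SOURCE B (Python) =====
-- from typing import List
--
-- def _first_greater(a, lo, v):
--     # first index idx >= lo with a[idx] > v in sorted list a (len(a) if none): binary search
--     hi = len(a)
--     while lo < hi:
--         mid = (lo + hi) // 2
--         if a[mid] <= v:
--             lo = mid + 1
--         else:
--             hi = mid
--     return lo
--
-- def makeArrayIncreasing(arr1: List[int], arr2: List[int]) -> int:
--     arr2 = sorted(arr2)
--     cnt = 0
--     j = 0
--     for i in range(len(arr1) - 1):
--         if arr1[i] >= arr1[i + 1]:
--             idx = _first_greater(arr2, j, arr1[i - 1]) if i > 0 else j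
--             if idx < len(arr2) and arr2[idx] < arr1[i + 1]:
--                 cnt += 1
--                 j = idx + 1
--             else:
--                 return -1
--     return cnt
-- ===== Notes on version B (the rewrite author's own statement) =====
-- stated objective: alternative
-- what changed: The inner element-by-element while-scan over sorted arr2 is replaced by a hand-written binary search (bisect_right style) that jumps directly to the first element strictly greater than arr1[i-1] from the monotone cursor j, then decides success or -1 with one comparison.
import Mathlib
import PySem

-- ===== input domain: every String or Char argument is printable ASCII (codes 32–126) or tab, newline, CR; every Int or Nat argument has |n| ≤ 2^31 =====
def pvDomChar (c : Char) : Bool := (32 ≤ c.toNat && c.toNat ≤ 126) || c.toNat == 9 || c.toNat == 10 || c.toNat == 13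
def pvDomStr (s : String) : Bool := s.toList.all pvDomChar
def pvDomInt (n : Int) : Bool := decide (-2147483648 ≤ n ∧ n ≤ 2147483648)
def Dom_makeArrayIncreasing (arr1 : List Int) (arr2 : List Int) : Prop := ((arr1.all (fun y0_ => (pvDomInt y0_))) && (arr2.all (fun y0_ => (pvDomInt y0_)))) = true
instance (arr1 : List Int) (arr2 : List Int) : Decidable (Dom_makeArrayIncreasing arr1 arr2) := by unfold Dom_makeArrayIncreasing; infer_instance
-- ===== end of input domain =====

-- B replaces A's inner linear while-scan of arr2 with a hand-written binary search; same results, a different mechanism (alternative).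
-- Loops are ported as structural recursion on a fuel counter that is always large enough (a totality device, not an algorithm change).

-- ===== PORT A =====
-- the inner `while True` scan: returns `some j'` (the cursor after `break`) or `none` (= `return -1`)
def scanAGo (arr1 arr2 : List Int) (i : Nat) (fuel : Nat) (j : Nat) : Option Nat :=
  match fuel with
  | 0 => none
  | fuel + 1 =>
    if arr2.length ≤ j then none
    else if (i = 0 ∨ arr1.getD (i - 1) 0 < arr2.getD j 0) ∧ arr2.getD j 0 < arr1.getD (i + 1) 0 then
      some (j + 1)
    else scanAGo arr1 arr2 i fuel (j + 1)

def scanA (arr1 arr2 : List Int) (i j : Nat) : Option Nat :=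
  scanAGo arr1 arr2 i (arr2.length + 1 - j) j

-- the `for i in range(len(arr1)-1)` loop carrying (cnt, j)
def loopAGo (arr1 arr2 : List Int) (fuel : Nat) (i : Nat) (cnt : Int) (j : Nat) : Int :=
  match fuel with
  | 0 => cnt
  | fuel + 1 =>
    if i < arr1.length - 1 then
      if arr1.getD (i + 1) 0 ≤ arr1.getD i 0 then
        match scanA arr1 arr2 i j with
        | none => -1
        | some j' => loopAGo arr1 arr2 fuel (i + 1) (cnt + 1) j'
      else loopAGo arr1 arr2 fuel (i + 1) cnt j
    else cnt

def makeArrayIncreasing (arr1 : List Int) (arr2 : List Int) : Int :=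
  loopAGo arr1 (PySem.List.sorted arr2 (fun x => x) false) arr1.length 0 0 0

-- ===== PORT B =====
-- Source B's hand-written binary search `_first_greater` (its while-loop, hi carried as a parameter)
def fgGo (a : List Int) (fuel : Nat) (lo hi : Nat) (v : Int) : Nat :=
  match fuel with
  | 0 => lo
  | fuel + 1 =>
    if lo < hi then
      if a.getD ((lo + hi) / 2) 0 ≤ v then fgGo a fuel ((lo + hi) / 2 + 1) hi v
      else fgGo a fuel lo ((lo + hi) / 2) v
    else lo

def firstGreater (a : List Int) (lo : Nat) (v : Int) : Nat :=
  fgGo a (a.length + 1) lo a.length v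

-- Source B's for-loop carrying (cnt, j)
def loopBGo (arr1 arr2 : List Int) (fuel : Nat) (i : Nat) (cnt : Int) (j : Nat) : Int :=
  match fuel with
  | 0 => cnt
  | fuel + 1 =>
    if i < arr1.length - 1 then
      if arr1.getD (i + 1) 0 ≤ arr1.getD i 0 then
        let idx := if 0 < i then firstGreater arr2 j (arr1.getD (i - 1) 0) else j
        if idx < arr2.length ∧ arr2.getD idx 0 < arr1.getD (i + 1) 0 then
          loopBGo arr1 arr2 fuel (i + 1) (cnt + 1) (idx + 1)
        else -1
      else loopBGo arr1 arr2 fuel (i + 1) cnt j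
    else cnt

def makeArrayIncreasing_alt (arr1 : List Int) (arr2 : List Int) : Int :=
  loopBGo arr1 (PySem.List.sorted arr2 (fun x => x) false) arr1.length 0 0 0

-- ===== PRECONDITION & SPEC =====
def Spec_makeArrayIncreasing (arr1 : List Int) (arr2 : List Int) (out : Int) : Prop := out = makeArrayIncreasing_alt arr1 arr2
instance (arr1 : List Int) (arr2 : List Int) (out : Int) : Decidable (Spec_makeArrayIncreasing arr1 arr2 out) := by unfold Spec_makeArrayIncreasing; infer_instance

-- ===== CLAIM (what is proved, stated in full; the proofs are below) =====
def Claim_equal_makeArrayIncreasing : Prop := ∀ (arr1 : List Int) (arr2 : List Int), Dom_makeArrayIncreasing arr1 arr2 → Spec_makeArrayIncreasing arr1 arr2 (makeArrayIncreasing arr1 arr2)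

-- ===== LEMMAS AND PROOFS =====

-- monotonicity of getD on a sorted list
theorem getD_mono (s : List Int) (hs : s.Pairwise (· ≤ ·)) (k m : Nat)
    (hkm : k ≤ m) (hm : m < s.length) : s.getD k 0 ≤ s.getD m 0 := by
  rcases Nat.lt_or_ge k m with h | h
  · have hk : k < s.length := Nat.lt_trans h hm
    rw [List.getD_eq_getElem s 0 hk, List.getD_eq_getElem s 0 hm]
    exact List.pairwise_iff_getElem.mp hs k m hk hm h
  · have : k = m := Nat.le_antisymm hkm h
    rw [this]

theorem scanA_stop (arr1 s : List Int) (i j : Nat) (hj : s.length ≤ j) :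
    scanA arr1 s i j = none := by
  unfold scanA
  cases h : s.length + 1 - j <;> simp [scanAGo, hj]

theorem scanA_unfold (arr1 s : List Int) (i j : Nat) (hj : j < s.length) :
    scanA arr1 s i j =
      if (i = 0 ∨ arr1.getD (i - 1) 0 < s.getD j 0) ∧ s.getD j 0 < arr1.getD (i + 1) 0 then
        some (j + 1)
      else scanA arr1 s i (j + 1) := by
  unfold scanA
  have h : s.length + 1 - j = (s.length + 1 - (j + 1)) + 1 := by omega
  rw [h, scanAGo, if_neg (Nat.not_le.mpr hj)]

-- once every remaining element is ≥ arr1[i+1], the scan runs off the end (return -1)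
theorem scanA_dead (arr1 s : List Int) (i j : Nat)
    (h : ∀ k, j ≤ k → k < s.length → arr1.getD (i + 1) 0 ≤ s.getD k 0) :
    scanA arr1 s i j = none := by
  by_cases hj : s.length ≤ j
  · exact scanA_stop arr1 s i j hj
  · rw [scanA_unfold arr1 s i j (by omega)]
    have hcond : ¬ ((i = 0 ∨ arr1.getD (i - 1) 0 < s.getD j 0) ∧
        s.getD j 0 < arr1.getD (i + 1) 0) := by
      rintro ⟨-, h2⟩
      exact absurd h2 (not_lt.mpr (h j le_rfl (by omega)))
    rw [if_neg hcond]
    exact scanA_dead arr1 s i (j + 1) (fun k hk hk2 => h k (by omega) hk2)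
termination_by s.length - j
decreasing_by omega

-- elements ≤ arr1[i-1] are skipped (i > 0)
theorem scanA_skip (arr1 s : List Int) (i j idx : Nat) (hi : 0 < i)
    (hj : j ≤ idx) (hlen : idx ≤ s.length)
    (h : ∀ k, j ≤ k → k < idx → s.getD k 0 ≤ arr1.getD (i - 1) 0) :
    scanA arr1 s i j = scanA arr1 s i idx := by
  rcases Nat.eq_or_lt_of_le hj with he | hlt
  · rw [he]
  · rw [scanA_unfold arr1 s i j (by omega)]
    have hcond : ¬ ((i = 0 ∨ arr1.getD (i - 1) 0 < s.getD j 0) ∧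
        s.getD j 0 < arr1.getD (i + 1) 0) := by
      rintro ⟨h0 | hgt, -⟩
      · omega
      · exact absurd hgt (not_lt.mpr (h j le_rfl hlt))
    rw [if_neg hcond]
    exact scanA_skip arr1 s i (j + 1) idx hi (by omega) hlen
      (fun k hk hk2 => h k (by omega) hk2)
termination_by idx - j
decreasing_by omega

-- characterisation of the binary-search loop (fuel large enough)
theorem fgGo_spec (s : List Int) (hs : s.Pairwise (· ≤ ·)) (v : Int) (fuel : Nat) :
    ∀ lo hi : Nat, hi - lo < fuel → lo ≤ hi → hi ≤ s.length →
    lo ≤ fgGo s fuel lo hi v ∧ fgGo s fuel lo hi v ≤ hi ∧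
    (∀ k, lo ≤ k → k < fgGo s fuel lo hi v → s.getD k 0 ≤ v) ∧
    (fgGo s fuel lo hi v < hi → v < s.getD (fgGo s fuel lo hi v) 0) := by
  induction fuel with
  | zero => intro lo hi hf _ _; omega
  | succ fuel ih =>
    intro lo hi hf hlh hhi
    by_cases hlt : lo < hi
    · rw [fgGo, if_pos hlt]
      by_cases hm : s.getD ((lo + hi) / 2) 0 ≤ v
      · rw [if_pos hm]
        obtain ⟨ih1, ih2, ih3, ih4⟩ := ih ((lo + hi) / 2 + 1) hi (by omega) (by omega) hhi
        refine ⟨by omega, ih2, ?_, ih4⟩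
        intro k hk1 hk2
        by_cases hk : k ≤ (lo + hi) / 2
        · exact le_trans (getD_mono s hs k ((lo + hi) / 2) hk (by omega)) hm
        · exact ih3 k (by omega) hk2
      · rw [if_neg hm]
        obtain ⟨ih1, ih2, ih3, ih4⟩ := ih lo ((lo + hi) / 2) (by omega) (by omega) (by omega)
        refine ⟨ih1, by omega, ih3, ?_⟩
        intro _
        rcases Nat.lt_or_ge (fgGo s fuel lo ((lo + hi) / 2) v) ((lo + hi) / 2) with h' | h'
        · exact ih4 h'
        · rw [Nat.le_antisymm ih2 h']
          exact not_le.mp hm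
    · rw [fgGo, if_neg hlt]
      exact ⟨le_rfl, hlh, fun k h1 h2 => absurd h2 (by omega), fun h => absurd h (by omega)⟩

theorem firstGreater_spec (s : List Int) (hs : s.Pairwise (· ≤ ·)) (v : Int) (lo : Nat)
    (hlo : lo ≤ s.length) :
    lo ≤ firstGreater s lo v ∧ firstGreater s lo v ≤ s.length ∧
    (∀ k, lo ≤ k → k < firstGreater s lo v → s.getD k 0 ≤ v) ∧
    (firstGreater s lo v < s.length → v < s.getD (firstGreater s lo v) 0) :=
  fgGo_spec s hs v (s.length + 1) lo s.length (by omega) hlo le_rfl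

-- the scan equals Source B's binary-search step
theorem scanA_eq (arr1 s : List Int) (hs : s.Pairwise (· ≤ ·)) (i j idx : Nat)
    (hj : j ≤ s.length)
    (hidx : idx = if 0 < i then firstGreater s j (arr1.getD (i - 1) 0) else j) :
    scanA arr1 s i j =
      if idx < s.length ∧ s.getD idx 0 < arr1.getD (i + 1) 0 then some (idx + 1)
      else none := by
  have hstep : j ≤ idx ∧ idx ≤ s.length ∧ scanA arr1 s i j = scanA arr1 s i idx ∧
      (idx < s.length → (i = 0 ∨ arr1.getD (i - 1) 0 < s.getD idx 0)) := by
    by_cases hi0 : 0 < i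
    · rw [hidx, if_pos hi0]
      obtain ⟨h1, h2, h3, h4⟩ := firstGreater_spec s hs (arr1.getD (i - 1) 0) j hj
      exact ⟨h1, h2, scanA_skip arr1 s i j _ hi0 h1 h2 h3, fun hl => Or.inr (h4 hl)⟩
    · rw [hidx, if_neg hi0]
      exact ⟨le_rfl, hj, rfl, fun _ => Or.inl (by omega)⟩
  obtain ⟨h1, h2, h3, h4⟩ := hstep
  rw [h3]
  by_cases hlen : idx < s.length
  · rw [scanA_unfold arr1 s i idx hlen]
    by_cases hb : s.getD idx 0 < arr1.getD (i + 1) 0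
    · rw [if_pos ⟨h4 hlen, hb⟩, if_pos ⟨hlen, hb⟩]
    · rw [if_neg (fun hc => hb hc.2), if_neg (fun hc => hb hc.2)]
      exact scanA_dead arr1 s i (idx + 1)
        (fun k hk1 hk2 => le_trans (not_lt.mp hb) (getD_mono s hs idx k (by omega) hk2))
  · rw [scanA_stop arr1 s i idx (by omega), if_neg (fun hc => hlen hc.1)]

theorem loopGo_eq (arr1 s : List Int) (hs : s.Pairwise (· ≤ ·)) (fuel : Nat) :
    ∀ (i : Nat) (cnt : Int) (j : Nat), j ≤ s.length →
    loopAGo arr1 s fuel i cnt j = loopBGo arr1 s fuel i cnt j := by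
  induction fuel with
  | zero => intro i cnt j _; rfl
  | succ fuel ih =>
    intro i cnt j hj
    rw [loopAGo, loopBGo]
    by_cases h1 : i < arr1.length - 1
    · rw [if_pos h1, if_pos h1]
      by_cases h2 : arr1.getD (i + 1) 0 ≤ arr1.getD i 0
      · rw [if_pos h2, if_pos h2]
        rw [scanA_eq arr1 s hs i j _ hj rfl]
        show _ = if (if 0 < i then firstGreater s j (arr1.getD (i - 1) 0) else j) < s.length ∧
            s.getD (if 0 < i then firstGreater s j (arr1.getD (i - 1) 0) else j) 0 <
              arr1.getD (i + 1) 0 then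
            loopBGo arr1 s fuel (i + 1) (cnt + 1)
              ((if 0 < i then firstGreater s j (arr1.getD (i - 1) 0) else j) + 1)
          else -1
        by_cases h3 : (if 0 < i then firstGreater s j (arr1.getD (i - 1) 0) else j) < s.length ∧
            s.getD (if 0 < i then firstGreater s j (arr1.getD (i - 1) 0) else j) 0 <
              arr1.getD (i + 1) 0
        · rw [if_pos h3, if_pos h3]
          exact ih (i + 1) (cnt + 1) _ (by omega)
        · rw [if_neg h3, if_neg h3]
      · rw [if_neg h2, if_neg h2]
        exact ih (i + 1) cnt j hj
    · rw [if_neg h1, if_neg h1]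

-- ===== VERDICT (by name: the statement is the Claim_ definition above) =====
theorem makeArrayIncreasing_spec : Claim_equal_makeArrayIncreasing := by
  intro arr1 arr2 _
  unfold Spec_makeArrayIncreasing makeArrayIncreasing makeArrayIncreasing_alt
  exact loopGo_eq arr1 _ (PySem.List.sorted_pairwise arr2 (fun x => x)) arr1.length 0 0 0 (Nat.zero_le _)
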